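-- pv_equiv track=rewrite | github.com/turonova/cryoCAT | cryocat/tango.py | build_descriptor_feature_map
-- ===== SOURCE A (Python) =====
-- def build_descriptor_feature_map(desc_list, feat_list):
--     result = {}
--     for desc in desc_list:
--         if not desc.endswith("Descriptor"):
--             continue  # skip invalid entries
--         base = desc[: -len("Descriptor")]
--         matches = [b for b in feat_list if b.endswith(base)]
--         result[desc] = matches
--     return result
-- ===== SOURCE B (Python) =====
-- def build_descriptor_feature_map(desc_list, feat_list):
--     # Build a suffix index once: every suffix of every feature maps to the list of
--     # features (in feat_list order) that end with it; each descriptor's base is then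
--     # a single dict lookup instead of a scan of feat_list.
--     index = {}
--     for f in feat_list:
--         s = f
--         while True:
--             index.setdefault(s, []).append(f)
--             if not s:
--                 break
--             s = s[1:]
--     return {d: index.get(d[: -len("Descriptor")], [])
--             for d in desc_list if d.endswith("Descriptor")}
-- ===== Notes on version B (the rewrite author's own statement) =====
-- stated objective: alternative
-- what changed: A rescans feat_list for every valid descriptor with an endswith test; B builds a suffix index once (every suffix of every feature mapped to the features ending in it, in feat order) and answers each descriptor's base by a single dict lookup.
import Mathlib
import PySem

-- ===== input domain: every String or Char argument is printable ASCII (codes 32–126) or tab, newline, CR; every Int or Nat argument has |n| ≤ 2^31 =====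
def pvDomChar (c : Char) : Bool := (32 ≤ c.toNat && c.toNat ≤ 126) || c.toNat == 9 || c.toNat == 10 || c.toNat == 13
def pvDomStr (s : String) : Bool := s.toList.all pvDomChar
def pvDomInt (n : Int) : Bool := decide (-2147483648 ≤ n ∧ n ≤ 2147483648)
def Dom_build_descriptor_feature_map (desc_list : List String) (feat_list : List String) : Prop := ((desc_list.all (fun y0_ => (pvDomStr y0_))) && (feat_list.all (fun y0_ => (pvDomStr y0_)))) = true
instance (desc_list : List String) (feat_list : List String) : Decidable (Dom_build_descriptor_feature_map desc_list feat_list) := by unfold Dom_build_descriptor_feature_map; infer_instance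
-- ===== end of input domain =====

-- B replaces A's per-descriptor rescans of feat_list by a suffix index built once over
-- the features (every suffix of every feature -> features ending in it), so each
-- descriptor's base becomes a single dict lookup (alternative algorithm).


-- ===== PORT A =====
-- loop body of A's 'for desc in desc_list' (dict update with the matched list)
def bdfStepA (feat_list : List String) (result : PySem.Dict String (List String))
    (desc : String) : PySem.Dict String (List String) :=
  if !(PySem.Str.endswith desc "Descriptor") then result
  else
    let base := PySem.Str.slice desc none (some (-(10 : Int)))   -- desc[: -len("Descriptor")]
    let matched := feat_list.foldl
      (fun ms b => if PySem.Str.endswith b base then ms ++ [b] else ms) []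
    result.insert desc matched

def build_descriptor_feature_map (desc_list : List String) (feat_list : List String) :
    List (String × List String) :=
  (desc_list.foldl (bdfStepA feat_list) PySem.Dict.empty).items

-- ===== PORT B =====
-- B's inner while loop: walk the suffix chain of feature f (s, s[1:], …, "")
-- appending f to index[s] (index.setdefault(s, []).append(f) = Dict.modify s [] (· ++ [f]));
-- the chain is peeled char by char, so it is the structural recursion on f's char list.
def bdfAddSuffixes (f : String) (index : PySem.Dict String (List String)) :
    List Char → PySem.Dict String (List String)
  | [] => index.modify (String.ofList []) [] (· ++ [f])
  | c :: t => bdfAddSuffixes f (index.modify (String.ofList (c :: t)) [] (· ++ [f])) t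

-- B's first loop: build the suffix index over feat_list
def bdfIndex (feat_list : List String) : PySem.Dict String (List String) :=
  feat_list.foldl (fun index f => bdfAddSuffixes f index f.toList) PySem.Dict.empty

-- B's final dict comprehension (insertion with overwrite, as a fold)
def build_descriptor_feature_map_alt (desc_list : List String) (feat_list : List String) :
    List (String × List String) :=
  let index := bdfIndex feat_list
  (desc_list.foldl
    (fun res d =>
      if PySem.Str.endswith d "Descriptor" then
        res.insert d (index.getD (PySem.Str.slice d none (some (-(10 : Int)))) [])
      else res)
    PySem.Dict.empty).items

-- ===== PRECONDITION & SPEC =====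
def Spec_build_descriptor_feature_map (desc_list : List String) (feat_list : List String) (out : List (String × List String)) : Prop := out = build_descriptor_feature_map_alt desc_list feat_list
instance (desc_list : List String) (feat_list : List String) (out : List (String × List String)) : Decidable (Spec_build_descriptor_feature_map desc_list feat_list out) := by unfold Spec_build_descriptor_feature_map; infer_instance

-- ===== CLAIM (what is proved, stated in full; the proofs are below) =====
def Claim_equal_build_descriptor_feature_map : Prop := ∀ (desc_list : List String) (feat_list : List String), Dom_build_descriptor_feature_map desc_list feat_list → Spec_build_descriptor_feature_map desc_list feat_list (build_descriptor_feature_map desc_list feat_list)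

-- ===== LEMMAS AND PROOFS =====

-- walking the suffix chain of l appends f exactly at the keys that are suffixes of l
lemma bdfAddSuffixes_getD (f : String) (s : String) :
    ∀ (l : List Char) (index : PySem.Dict String (List String)),
      (bdfAddSuffixes f index l).getD s []
        = if s.toList <:+ l then index.getD s [] ++ [f] else index.getD s [] := by
  intro l
  induction l with
  | nil =>
    intro index
    simp only [bdfAddSuffixes, PySem.Dict.getD_modify]
    by_cases h : s = String.ofList []
    · have hs : s.toList = ([] : List Char) := by rw [h, String.toList_ofList]
      simp [h]
    · have hs : s.toList ≠ ([] : List Char) := by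
        intro hc; exact h (String.toList_inj.mp (by rw [hc, String.toList_ofList]))
      simp [h, List.suffix_nil, hs]
  | cons c t ih =>
    intro index
    simp only [bdfAddSuffixes, ih, PySem.Dict.getD_modify]
    by_cases ht : s.toList <:+ t
    · have hlen : s.toList.length ≤ t.length := ht.length_le
      have hne : s ≠ String.ofList (c :: t) := by
        intro hc
        have : s.toList = c :: t := by rw [hc, String.toList_ofList]
        simp [this] at hlen
      have : s.toList <:+ c :: t := ht.trans (List.suffix_cons c t)
      simp [ht, hne, this]
    · by_cases h : s = String.ofList (c :: t)
      · have hs : s.toList = c :: t := by rw [h, String.toList_ofList]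
        have hnt : ¬ (c :: t <:+ t) := fun hc => absurd hc.length_le (by simp)
        simp [h, hnt]
      · have hs : ¬ (s.toList <:+ c :: t) := by
          intro hc
          rcases List.suffix_cons_iff.mp hc with he | hsuf
          · exact h (String.toList_inj.mp (by rw [he, String.toList_ofList]))
          · exact ht hsuf
        simp [ht, h, hs]

-- the suffix index lists, for each key s, exactly the features ending in s, in order
lemma bdfIndex_getD (feat_list : List String) (s : String) :
    (bdfIndex feat_list).getD s []
      = feat_list.filter (fun b => PySem.Str.endswith b s) := by
  unfold bdfIndex
  suffices h : ∀ (fs : List String) (d : PySem.Dict String (List String)),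
      (fs.foldl (fun index f => bdfAddSuffixes f index f.toList) d).getD s []
        = d.getD s [] ++ fs.filter (fun b => PySem.Str.endswith b s) by
    simpa using h feat_list PySem.Dict.empty
  intro fs
  induction fs with
  | nil => intro d; simp
  | cons f rest ih =>
    intro d
    simp only [List.foldl_cons, ih, bdfAddSuffixes_getD, List.filter_cons]
    by_cases h : s.toList <:+ f.toList
    · have he : PySem.Str.endswith f s = true := by
        rw [PySem.Str.endswith_eq]; exact (PySem.Chars.endswith_iff _ _).mpr h
      rw [if_pos h, if_pos he]
      simp
    · have he : ¬ (PySem.Str.endswith f s = true) := by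
        rw [PySem.Str.endswith_eq]
        exact fun hc => h ((PySem.Chars.endswith_iff _ _).mp hc)
      rw [if_neg h, if_neg he]

-- the two per-descriptor step functions are equal
lemma bdfStep_eq (feat_list : List String) :
    bdfStepA feat_list
      = fun res d =>
          if PySem.Str.endswith d "Descriptor" then
            res.insert d ((bdfIndex feat_list).getD (PySem.Str.slice d none (some (-(10 : Int)))) [])
          else res := by
  funext res d
  unfold bdfStepA
  cases hE : PySem.Str.endswith d "Descriptor" with
  | false => simp only [Bool.not_false, if_true, Bool.false_eq_true, if_false]
  | true =>
    simp only [Bool.not_true, Bool.false_eq_true, if_false, if_true]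
    have hfold := PySem.List.foldl_append_if
      (fun b => PySem.Str.endswith b (PySem.Str.slice d none (some (-(10 : Int))))) id
      feat_list ([] : List String)
    simp only [id, List.nil_append] at hfold
    rw [hfold, List.map_id, bdfIndex_getD]

-- ===== VERDICT (by name: the statement is the Claim_ definition above) =====
theorem build_descriptor_feature_map_spec : Claim_equal_build_descriptor_feature_map := by
  intro desc_list feat_list _
  unfold Spec_build_descriptor_feature_map build_descriptor_feature_map build_descriptor_feature_map_alt
  rw [bdfStep_eq]
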